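-- pv_equiv track=rewrite | github.com/ankitajannu/Python-_Assignments | Assignment_17/Assignment17_10.py | SumDigit
-- ===== SOURCE A (Python) =====
-- def SumDigit(No):
--     Sum = 0
--     Count = 0
--
--     if(No == 0):
--         return 1
--
--     while(No != 0):
--         Count = Count + 1
--         Sum = Sum + Count
--         No = No // 10
--
--     return Sum
-- ===== SOURCE B (Python) =====
-- def SumDigit(No):
--     d = len(str(No))
--     return d * (d + 1) // 2
-- ===== Notes on version B (the rewrite author's own statement) =====
-- stated objective: simpler
-- what changed: replaces A's accumulate-while-dividing loop (and its No==0 special case) by the digit count len(str(No)) and the closed-form triangular number d*(d+1)//2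
import Mathlib
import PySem

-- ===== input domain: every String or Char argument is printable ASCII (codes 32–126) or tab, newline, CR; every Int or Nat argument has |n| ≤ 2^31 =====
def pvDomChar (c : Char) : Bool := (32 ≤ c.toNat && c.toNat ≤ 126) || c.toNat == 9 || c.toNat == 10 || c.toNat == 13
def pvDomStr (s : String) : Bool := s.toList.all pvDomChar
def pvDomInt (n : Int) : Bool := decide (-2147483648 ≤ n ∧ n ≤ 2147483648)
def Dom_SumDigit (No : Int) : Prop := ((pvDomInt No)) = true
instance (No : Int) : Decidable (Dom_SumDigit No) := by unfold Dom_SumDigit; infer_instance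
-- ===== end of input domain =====

-- B replaces A's accumulate-while-dividing loop by len(str(No)) and the closed-form
-- triangular number d*(d+1)//2 — simpler, same cost.

-- ===== PORT A =====
-- A's while loop, made total with fuel (the loop runs at most No.toNat iterations
-- on the admitted inputs; fuel only makes the same computation total).
def SumDigitLoop : Nat → Int → Int → Int → Int
  | 0, _, _, sum => sum
  | f + 1, no, cnt, sum =>
    if no = 0 then sum
    else SumDigitLoop f (PySem.Int.floordiv no 10) (cnt + 1) (sum + (cnt + 1))

def SumDigit (No : Int) : Int :=
  if No = 0 then 1 else SumDigitLoop (No.toNat + 1) No 0 0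

-- ===== PORT B =====
def SumDigit_alt (No : Int) : Int :=
  let d := PySem.Str.len (PySem.Int.toStr No)
  PySem.Int.floordiv (d * (d + 1)) 2

-- ===== PRECONDITION & SPEC =====
-- Pre_ excludes negative No, on which A never returns: its while loop diverges
-- (No // 10 reaches -1 and stays -1 forever under Python floor division).
def Pre_SumDigit (No : Int) : Prop := 0 ≤ No
instance (No : Int) : Decidable (Pre_SumDigit No) := by unfold Pre_SumDigit; infer_instance

def pvWitness_SumDigit : Int := 12

def Spec_SumDigit (No : Int) (out : Int) : Prop := out = SumDigit_alt No
instance (No : Int) (out : Int) : Decidable (Spec_SumDigit No out) := by unfold Spec_SumDigit; infer_instance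

-- ===== CLAIM (what is proved, stated in full; the proofs are below) =====
def Claim_equal_SumDigit : Prop := ∀ (No : Int), Dom_SumDigit No → Pre_SumDigit No → Spec_SumDigit No (SumDigit No)

-- ===== LEMMAS AND PROOFS =====

-- number of decimal digits of a positive Nat (0 for 0)
def dcount (n : Nat) : Nat :=
  if h : n = 0 then 0 else dcount (n / 10) + 1
decreasing_by exact Nat.div_lt_self (Nat.pos_of_ne_zero h) (by omega)

lemma dcount_zero : dcount 0 = 0 := by unfold dcount; simp

lemma dcount_of_ne_zero {n : Nat} (h : n ≠ 0) : dcount n = dcount (n / 10) + 1 := by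
  conv_lhs => unfold dcount
  simp [h]

-- the triangular number d*(d+1)/2 as an Int, with its defining equation
def tri (d : Nat) : Int := ((d * (d + 1)) / 2 : Nat)

lemma two_tri (d : Nat) : 2 * tri d = (d : Int) * (d + 1) := by
  unfold tri
  have hd : (2 : Nat) ∣ d * (d + 1) := (Nat.even_mul_succ_self d).two_dvd
  have h : 2 * ((d * (d + 1)) / 2) = d * (d + 1) := Nat.mul_div_cancel' hd
  exact_mod_cast congrArg (Nat.cast (R := Int)) h

-- A's loop computes the closed form: sum + dcount·cnt + tri (dcount n)
lemma SumDigitLoop_eq : ∀ (f n : Nat), n ≤ f → ∀ (cnt sum : Int),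
    SumDigitLoop f (n : Int) cnt sum = sum + (dcount n : Int) * cnt + tri (dcount n) := by
  intro f
  induction f with
  | zero =>
    intro n hn cnt sum
    have : n = 0 := Nat.le_zero.mp hn
    subst this
    simp [SumDigitLoop, dcount_zero, tri]
  | succ f ih =>
    intro n hn cnt sum
    by_cases h0 : n = 0
    · subst h0
      simp [SumDigitLoop, dcount_zero, tri]
    · have hcast : (n : Int) ≠ 0 := by exact_mod_cast h0
      have hdiv : PySem.Int.floordiv (n : Int) 10 = ((n / 10 : Nat) : Int) := by
        exact_mod_cast PySem.Int.floordiv_natCast n 10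
      have hle : n / 10 ≤ f := by
        have := Nat.div_lt_self (Nat.pos_of_ne_zero h0) (show 1 < 10 by omega)
        omega
      have hrec := ih (n / 10) hle (cnt + 1) (sum + (cnt + 1))
      have hstep : SumDigitLoop (f + 1) (n : Int) cnt sum
            = SumDigitLoop f (PySem.Int.floordiv (n : Int) 10) (cnt + 1) (sum + (cnt + 1)) := by
        simp only [SumDigitLoop, if_neg hcast]
      rw [hstep, hdiv, hrec, dcount_of_ne_zero h0]
      have h1 := two_tri (dcount (n / 10))
      have h2 := two_tri (dcount (n / 10) + 1)
      push_cast at h1 h2 ⊢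
      linarith

-- length of Nat.toDigits 10
lemma toDigitsCore_len : ∀ (f n : Nat), n < f → ∀ (acc : List Char),
    (Nat.toDigitsCore 10 f n acc).length = (if n = 0 then 1 else dcount n) + acc.length := by
  intro f
  induction f with
  | zero => intro n hn; exact absurd hn (Nat.not_lt_zero n)
  | succ f ih =>
    intro n hn acc
    by_cases hq : n / 10 = 0
    · have hstep : Nat.toDigitsCore 10 (f + 1) n acc = (n % 10).digitChar :: acc := by
        simp [Nat.toDigitsCore, hq]
      rw [hstep]
      by_cases h0 : n = 0
      · simp [h0]; omega
      · rw [dcount_of_ne_zero h0, hq, dcount_zero]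
        simp [h0]; omega
    · have h0 : n ≠ 0 := by intro h; subst h; simp at hq
      have hstep : Nat.toDigitsCore 10 (f + 1) n acc
          = Nat.toDigitsCore 10 f (n / 10) ((n % 10).digitChar :: acc) := by
        simp [Nat.toDigitsCore, hq]
      have hlt : n / 10 < f := by
        have := Nat.div_lt_self (Nat.pos_of_ne_zero h0) (show 1 < 10 by omega)
        omega
      rw [hstep, ih (n / 10) hlt, if_neg hq, if_neg h0, dcount_of_ne_zero h0]
      simp only [List.length_cons]
      omega

lemma toDigits_len (n : Nat) :
    (Nat.toDigits 10 n).length = (if n = 0 then 1 else dcount n) := by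
  have := toDigitsCore_len (n + 1) n (by omega) []
  simpa [Nat.toDigits] using this

-- B in closed form on nonnegative inputs
lemma SumDigit_alt_eq (n : Nat) :
    SumDigit_alt (n : Int) = tri (if n = 0 then 1 else dcount n) := by
  have hnn : ¬ ((n : Int) < 0) := by exact_mod_cast Int.not_lt.mpr (Int.natCast_nonneg n)
  have hchars : PySem.Int.toChars (n : Int) = Nat.toDigits 10 n := by
    simp [PySem.Int.toChars, hnn]
  set m : Nat := if n = 0 then 1 else dcount n with hm
  have hlen : PySem.Str.len (PySem.Int.toStr (n : Int)) = (m : Int) := by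
    rw [PySem.Str.len_eq, PySem.Int.toList_toStr, hchars, toDigits_len]
  show PySem.Int.floordiv
      (PySem.Str.len (PySem.Int.toStr (n : Int)) * (PySem.Str.len (PySem.Int.toStr (n : Int)) + 1)) 2
    = tri m
  rw [hlen]
  have : (m : Int) * ((m : Int) + 1) = ((m * (m + 1) : Nat) : Int) := by push_cast; ring
  rw [this]
  have := PySem.Int.floordiv_natCast (m * (m + 1)) 2
  exact_mod_cast this

-- ===== VERDICT (by name: the statement is the Claim_ definition above) =====
theorem SumDigit_spec : Claim_equal_SumDigit := by
  intro No _ hpre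
  unfold Spec_SumDigit
  obtain ⟨n, rfl⟩ := Int.eq_ofNat_of_zero_le hpre
  by_cases h0 : n = 0
  · subst h0; decide
  · have hA : SumDigit (n : Int) = SumDigitLoop (n + 1) (n : Int) 0 0 := by
      have hne : (n : Int) ≠ 0 := by exact_mod_cast h0
      simp only [SumDigit, if_neg hne, Int.toNat_natCast]
    rw [hA, SumDigitLoop_eq (n + 1) n (by omega) 0 0, SumDigit_alt_eq]
    simp [h0]
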